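-- pv_equiv track=rewrite | github.com/RuslanFatikhov/loto-loto-loto | digital-loto-project/app-bu.py | validate_ticket_numbers
-- ===== SOURCE A (Python) =====
-- from typing import List, Dict, Optional, Union
--
-- def validate_ticket_numbers(numbers: List[int], draw_type: str) -> bool:
--     """Валидация чисел билета"""
--     required_count = 8 if draw_type == 'big' else 6
--
--     if len(numbers) != required_count:
--         return False
--
--     if not all(1 <= num <= 36 for num in numbers):
--         return False
--
--     if len(set(numbers)) != len(numbers):  # Проверка на дубликаты
--         return False
--
--     return True
-- ===== SOURCE B (Python) =====
-- def validate_ticket_numbers(numbers, draw_type):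
--     """Валидация чисел билета: sort once, then read range from the endpoints
--     and duplicates from adjacent pairs."""
--     required_count = 8 if draw_type == 'big' else 6
--
--     if len(numbers) != required_count:
--         return False
--
--     s = sorted(numbers)
--
--     if s and (s[0] < 1 or s[-1] > 36):
--         return False
--
--     return all(a != b for a, b in zip(s, s[1:]))
-- ===== Notes on version B (the rewrite author's own statement) =====
-- stated objective: alternative
-- what changed: Instead of three independent scans (all-in-range, set(numbers) size comparison), B sorts the list once and derives the range check from the two sorted endpoints and the duplicate check from a single adjacent-pair scan of the sorted list.
import Mathlib
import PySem

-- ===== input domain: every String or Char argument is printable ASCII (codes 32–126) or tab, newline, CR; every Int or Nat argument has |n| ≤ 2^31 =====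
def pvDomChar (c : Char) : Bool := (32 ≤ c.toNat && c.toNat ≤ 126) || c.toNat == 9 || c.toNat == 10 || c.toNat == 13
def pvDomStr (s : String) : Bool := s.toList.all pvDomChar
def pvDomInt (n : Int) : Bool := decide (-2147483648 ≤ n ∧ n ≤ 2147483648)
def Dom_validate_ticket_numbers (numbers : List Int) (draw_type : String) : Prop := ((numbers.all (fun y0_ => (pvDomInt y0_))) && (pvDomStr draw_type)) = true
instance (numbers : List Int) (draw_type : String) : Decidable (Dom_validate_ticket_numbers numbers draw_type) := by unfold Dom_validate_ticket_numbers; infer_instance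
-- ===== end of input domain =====

-- B replaces A's three independent scans (count, all-in-range, set-size duplicate check) by one sort
-- followed by an endpoint range check and an adjacent-pair duplicate scan (objective: alternative).


-- ===== PORT A =====
def validate_ticket_numbers (numbers : List Int) (draw_type : String) : Bool :=
  let required_count : Int := if draw_type = "big" then 8 else 6
  if (numbers.length : Int) ≠ required_count then
    false
  else if !(numbers.all (fun num => decide (1 ≤ num) && decide (num ≤ 36))) then
    false
  else if ((PySem.Set.ofList numbers).length : Int) ≠ (numbers.length : Int) then
    false
  else
    true

-- ===== PORT B =====
def validate_ticket_numbers_alt (numbers : List Int) (draw_type : String) : Bool :=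
  let required_count : Int := if draw_type = "big" then 8 else 6
  if (numbers.length : Int) ≠ required_count then
    false
  else
    let s := PySem.List.sorted numbers (fun x => x)
    -- s[0] / s[-1] are guarded by `s and …`, so the .getD default 0 is never read
    if !s.isEmpty && (decide (PySem.List.pyGetD s 0 0 < 1) || decide (PySem.List.pyGetD s (-1) 0 > 36)) then
      false
    else
      (s.zip (PySem.List.slice s (some 1) none)).all (fun p => p.1 != p.2)

-- ===== PRECONDITION & SPEC =====
def Spec_validate_ticket_numbers (numbers : List Int) (draw_type : String) (out : Bool) : Prop := out = validate_ticket_numbers_alt numbers draw_type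
instance (numbers : List Int) (draw_type : String) (out : Bool) : Decidable (Spec_validate_ticket_numbers numbers draw_type out) := by unfold Spec_validate_ticket_numbers; infer_instance

-- ===== CLAIM (what is proved, stated in full; the proofs are below) =====
def Claim_equal_validate_ticket_numbers : Prop := ∀ (numbers : List Int) (draw_type : String), Dom_validate_ticket_numbers numbers draw_type → Spec_validate_ticket_numbers numbers draw_type (validate_ticket_numbers numbers draw_type)

-- ===== LEMMAS AND PROOFS =====

-- The first occurrences kept by set(xs) form a sublist of xs.
theorem pv_ofList_sublist (xs : List Int) : List.Sublist (PySem.Set.ofList xs) xs := by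
  induction xs with
  | nil => simp [PySem.Set.ofList]
  | cons x t ih =>
    rw [PySem.Set.ofList_cons]
    refine List.Sublist.cons₂ x (List.Sublist.trans ?_ ih)
    simp only [PySem.Set.discard]
    exact List.filter_sublist

-- len(set(xs)) == len(xs)  ↔  xs has no duplicates.
theorem pv_ofList_length_eq_iff (xs : List Int) :
    (PySem.Set.ofList xs).length = xs.length ↔ xs.Nodup := by
  constructor
  · intro h
    have := List.Sublist.eq_of_length (pv_ofList_sublist xs) h
    rw [← this]; exact PySem.Set.nodup_ofList xs
  · intro h
    exact congrArg List.length (PySem.Set.ofList_eq_self_of_nodup xs h)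

-- In a ≤-sorted nonempty list every element is at most the last one.
theorem pv_le_getLast (l : List Int) (h : l ≠ []) (hp : l.Pairwise (· ≤ ·)) :
    ∀ x ∈ l, x ≤ l.getLast h := by
  induction l with
  | nil => simp at h
  | cons a t ih =>
    rcases List.pairwise_cons.mp hp with ⟨ha, ht⟩
    intro x hx
    cases t with
    | nil => simp at hx; simp [hx]
    | cons b t' =>
      rw [List.getLast_cons (by simp)]
      rcases List.mem_cons.mp hx with rfl | hx'
      · exact le_trans (ha b (by simp)) (ih (by simp) ht b (by simp))
      · exact ih (by simp) ht x hx'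

-- The head of a ≤-sorted list is at most every element.
theorem pv_head_min (l : List Int) (h : l ≠ []) (hp : l.Pairwise (· ≤ ·)) :
    ∀ x ∈ l, l.head h ≤ x := by
  cases l with
  | nil => exact absurd rfl h
  | cons m t =>
    intro x hx
    rcases List.pairwise_cons.mp hp with ⟨hm, _⟩
    rcases List.mem_cons.mp hx with rfl | hx'
    · simp
    · simpa using hm x hx'

-- In a ≤-sorted list, all adjacent pairs distinct  ↔  no duplicates.
theorem pv_adj_ne_iff_nodup (s : List Int) (hp : s.Pairwise (· ≤ ·)) :
    ((s.zip (s.drop 1)).all (fun p => p.1 != p.2) = true) ↔ s.Nodup := by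
  induction s with
  | nil => simp
  | cons a t ih =>
    rcases List.pairwise_cons.mp hp with ⟨ha, ht⟩
    cases t with
    | nil => simp
    | cons b t' =>
      have heq : ((a :: b :: t').zip ((a :: b :: t').drop 1)) =
          (a, b) :: ((b :: t').zip ((b :: t').drop 1)) := by simp
      rw [heq, List.all_cons, Bool.and_eq_true, ih ht]
      rcases List.pairwise_cons.mp ht with ⟨hb, _⟩
      constructor
      · rintro ⟨hne, hnd⟩
        refine List.nodup_cons.mpr ⟨?_, hnd⟩
        intro hmem
        have hab : a ≠ b := by simpa using hne
        rcases List.mem_cons.mp hmem with rfl | hmem'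
        · exact hab rfl
        · exact hab (le_antisymm (ha b (by simp)) (hb a hmem'))
      · intro h
        rcases List.nodup_cons.mp h with ⟨hnotm, hnd⟩
        refine ⟨?_, hnd⟩
        simpa using fun hab => hnotm (by simp [hab])

-- pyGetD on 0 / -1 of a nonempty list is head / last.
theorem pv_pyGetD_zero (s : List Int) (h : s ≠ []) : PySem.List.pyGetD s 0 0 = s.head h := by
  cases s with
  | nil => exact absurd rfl h
  | cons m t => simp [PySem.List.pyGetD, PySem.List.pyGet?, PySem.List.pyIdx?]

theorem pv_pyGetD_neg_one (s : List Int) (h : s ≠ []) : PySem.List.pyGetD s (-1) 0 = s.getLast h := by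
  simp [PySem.List.pyGetD, PySem.List.pyGet?_neg_one, List.getLast?_eq_getLast_of_ne_nil h]

theorem pv_main (numbers : List Int) (draw_type : String) :
    validate_ticket_numbers numbers draw_type = validate_ticket_numbers_alt numbers draw_type := by
  simp only [validate_ticket_numbers, validate_ticket_numbers_alt]
  by_cases hlen : (numbers.length : Int) = (if draw_type = "big" then (8 : Int) else 6)
  · have hne : numbers ≠ [] := by
      intro h; subst h; simp at hlen; split_ifs at hlen <;> omega
    have hlenne : ¬ ((numbers.length : Int) ≠ (if draw_type = "big" then (8 : Int) else 6)) := by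
      simpa using hlen
    simp only [if_neg hlenne]
    obtain ⟨s, hs⟩ : ∃ s, PySem.List.sorted numbers (fun x => x) = s := ⟨_, rfl⟩
    rw [hs]
    have hperm : List.Perm s numbers := hs ▸ PySem.List.sorted_perm numbers (fun x => x) false
    have hsp : s.Pairwise (· ≤ ·) := hs ▸ PySem.List.sorted_pairwise numbers (fun x => x)
    have hsn : s ≠ [] := by
      intro h; subst h
      exact hne ((PySem.List.sorted_eq_nil_iff numbers (fun x => x) false).mp hs)
    have hslice : PySem.List.slice s (some 1) none = s.drop 1 := by simp [pysem]
    by_cases hall : numbers.all (fun num => decide (1 ≤ num) && decide (num ≤ 36)) = true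
    · -- all in [1,36]: the endpoint guard is false, both reduce to the duplicate test
      have hin : ∀ x ∈ numbers, 1 ≤ x ∧ x ≤ 36 := by
        intro x hx; have := List.all_eq_true.mp hall x hx; simpa using this
      have hguard : (!s.isEmpty &&
          (decide (PySem.List.pyGetD s 0 0 < 1) || decide (PySem.List.pyGetD s (-1) 0 > 36))) = false := by
        rw [pv_pyGetD_zero s hsn, pv_pyGetD_neg_one s hsn]
        have h1 : 1 ≤ s.head hsn := (hin _ (hperm.mem_iff.mp (List.head_mem hsn))).1
        have h2 : s.getLast hsn ≤ 36 := (hin _ (hperm.mem_iff.mp (List.getLast_mem hsn))).2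
        simp only [Bool.and_eq_false_iff, Bool.or_eq_false_iff, decide_eq_false_iff_not]
        right; constructor <;> omega
      rw [hall, hguard, hslice]
      simp only [Bool.not_true, Bool.false_eq_true, if_false]
      rw [Bool.eq_iff_iff, pv_adj_ne_iff_nodup s hsp, hperm.nodup_iff, ← pv_ofList_length_eq_iff numbers]
      constructor
      · intro hA
        by_cases hd : ((PySem.Set.ofList numbers).length : Int) = (numbers.length : Int)
        · exact_mod_cast hd
        · rw [if_pos (by simpa using hd)] at hA; exact absurd hA (by simp)
      · intro hB
        rw [if_neg (by simp [hB])]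
    · -- an element lies outside [1,36]: A returns false and B's endpoint guard fires
      rw [Bool.not_eq_true] at hall
      obtain ⟨x, hxmem, hxbad⟩ : ∃ x ∈ numbers, ¬(1 ≤ x ∧ x ≤ 36) := by
        obtain ⟨x, hx, hpx⟩ := List.all_eq_false.mp hall
        exact ⟨x, hx, by simpa using hpx⟩
      have hxs : x ∈ s := hperm.mem_iff.mpr hxmem
      have hguard : (!s.isEmpty &&
          (decide (PySem.List.pyGetD s 0 0 < 1) || decide (PySem.List.pyGetD s (-1) 0 > 36))) = true := by
        rw [pv_pyGetD_zero s hsn, pv_pyGetD_neg_one s hsn]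
        have hiE : s.isEmpty = false := by simpa using hsn
        rcases not_and_or.mp hxbad with h | h
        · have : s.head hsn < 1 := lt_of_le_of_lt (pv_head_min s hsn hsp x hxs) (by omega)
          simp [hiE, this]
        · have : 36 < s.getLast hsn := lt_of_lt_of_le (by omega) (pv_le_getLast s hsn hsp x hxs)
          simp [hiE, this]
      rw [hall, hguard]
      simp
  · simp only [if_pos (show ((numbers.length : Int) ≠ (if draw_type = "big" then (8 : Int) else 6)) from hlen)]

-- ===== VERDICT (by name: the statement is the Claim_ definition above) =====
theorem validate_ticket_numbers_spec : Claim_equal_validate_ticket_numbers := by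
  intro numbers draw_type _
  unfold Spec_validate_ticket_numbers
  exact pv_main numbers draw_type
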